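-- pv_equiv track=rewrite | github.com/langflow-ai/openrag | src/services/widget_service.py | _normalize_widget_css_import
-- ===== SOURCE A (Python) =====
-- def _normalize_widget_css_import(jsx_code: str, widget_id: str, has_css: bool) -> str:
--     """Ensure generated JSX references the correct widget CSS file."""
--     lines = jsx_code.splitlines()
--     css_import_indices: list[int] = []
--
--     for idx, line in enumerate(lines):
--         stripped = line.strip()
--         if stripped.startswith("import") and ".css" in stripped:
--             css_import_indices.append(idx)
--
--     css_import_statement = f'import "./{widget_id}.css";'
--
--     if has_css:
--         if css_import_indices:
--             first_idx = css_import_indices[0]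
--             lines[first_idx] = css_import_statement
--             # Remove any additional css imports to prevent stale references
--             for idx in reversed(css_import_indices[1:]):
--                 lines.pop(idx)
--         else:
--             insert_idx = 0
--             while insert_idx < len(lines) and lines[insert_idx].strip().startswith("import"):
--                 insert_idx += 1
--             lines.insert(insert_idx, css_import_statement)
--     else:
--         for idx in reversed(css_import_indices):
--             lines.pop(idx)
--
--     return "\n".join(lines)
-- ===== SOURCE B (Python) =====
-- def _normalize_widget_css_import(jsx_code: str, widget_id: str, has_css: bool) -> str:
--     """Single constructive pass: keep non-css lines, canonicalise the first css
--     import (when has_css) and drop every other css import; if has_css and no css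
--     import existed, insert the statement after the leading import block."""
--     stmt = f'import "./{widget_id}.css";'
--     out: list[str] = []
--     placed = False
--     for line in jsx_code.splitlines():
--         s = line.strip()
--         if s.startswith("import") and ".css" in s:
--             if has_css and not placed:
--                 out.append(stmt)
--                 placed = True
--         else:
--             out.append(line)
--     if has_css and not placed:
--         i = next((k for k, l in enumerate(out) if not l.strip().startswith("import")), len(out))
--         out = out[:i] + [stmt] + out[i:]
--     return "\n".join(out)
-- ===== Notes on version B (the rewrite author's own statement) =====
-- stated objective: simpler
-- what changed: B replaces A's collect-css-indices / set / reverse-pop passes by one constructive pass that appends non-css lines and places the canonical statement at the first css line, inserting after the leading import block only when nothing was placed.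
import Mathlib
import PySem

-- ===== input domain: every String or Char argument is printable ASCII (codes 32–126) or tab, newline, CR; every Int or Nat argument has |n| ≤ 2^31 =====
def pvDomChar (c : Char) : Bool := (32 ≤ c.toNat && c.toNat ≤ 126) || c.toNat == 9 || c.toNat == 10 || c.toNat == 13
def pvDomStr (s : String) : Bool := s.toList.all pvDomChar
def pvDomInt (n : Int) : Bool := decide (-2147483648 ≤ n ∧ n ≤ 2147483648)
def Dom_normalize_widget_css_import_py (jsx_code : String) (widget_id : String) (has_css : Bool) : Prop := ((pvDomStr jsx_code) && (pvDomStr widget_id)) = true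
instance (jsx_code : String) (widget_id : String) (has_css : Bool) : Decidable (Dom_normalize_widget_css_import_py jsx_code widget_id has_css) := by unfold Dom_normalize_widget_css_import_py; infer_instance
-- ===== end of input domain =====

-- B builds the result in one constructive pass (simpler decomposition); A collects css-import
-- indices, overwrites the first and pops the rest. Equivalence of return values is proved; A
-- mutates only its local list, so there is no observable side effect.

-- ===== PORT A =====
-- shared by both ports: the css-import line test and the canonical statement (direct
-- transliterations of the identical source expressions)
def pvCssLine (line : String) : Bool :=
  PySem.Str.startswith (PySem.Str.strip line) "import" && PySem.Str.isIn ".css" (PySem.Str.strip line)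

def pvStmt (widget_id : String) : String :=
  PySem.Str.join "" ["import \"./", widget_id, ".css\";"]

-- A's index-collecting loop (for idx, line in enumerate(lines): … append(idx))
def pvCollectA (i : Nat) : List String → List Nat
  | [] => []
  | l :: ls => if pvCssLine l then i :: pvCollectA (i + 1) ls else pvCollectA (i + 1) ls

-- A's while loop advancing past the leading import lines
def pvCountImportsA : List String → Nat
  | [] => 0
  | l :: ls => if PySem.Str.startswith (PySem.Str.strip l) "import" then 1 + pvCountImportsA ls else 0

def normalize_widget_css_import_py (jsx_code : String) (widget_id : String) (has_css : Bool) : String :=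
  let lines := PySem.Str.splitlines jsx_code
  let idxs := pvCollectA 0 lines
  let stmt := pvStmt widget_id
  let lines' :=
    if has_css then
      match idxs with
      | first :: rest =>
          -- lines[first] = stmt; then pop the remaining indices in reverse
          -- (List.eraseIdx is exact for pop at the in-range indices enumerate produced)
          rest.reverse.foldl (fun ls i => ls.eraseIdx i) (lines.set first stmt)
      | [] =>
          PySem.List.insert lines ((pvCountImportsA lines : Nat) : Int) stmt
    else
      idxs.reverse.foldl (fun ls i => ls.eraseIdx i) lines
  PySem.Str.join "\n" lines'

-- ===== PORT B =====
-- B's single pass: returns (built list, placed flag)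
def pvBuildB (has_css : Bool) (stmt : String) (placed : Bool) : List String → List String × Bool
  | [] => ([], placed)
  | l :: ls =>
    if pvCssLine l then
      if has_css && !placed then
        let r := pvBuildB has_css stmt true ls
        (stmt :: r.1, r.2)
      else pvBuildB has_css stmt placed ls
    else
      let r := pvBuildB has_css stmt placed ls
      (l :: r.1, r.2)

-- B's next(… enumerate …): index of the first line not starting with "import" (default len)
def pvInsertPosB : List String → Nat
  | [] => 0
  | l :: ls => if PySem.Str.startswith (PySem.Str.strip l) "import" then pvInsertPosB ls + 1 else 0

def normalize_widget_css_import_py_alt (jsx_code : String) (widget_id : String) (has_css : Bool) : String :=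
  let stmt := pvStmt widget_id
  let r := pvBuildB has_css stmt false (PySem.Str.splitlines jsx_code)
  let out :=
    if has_css && !r.2 then
      let i := pvInsertPosB r.1
      r.1.take i ++ stmt :: r.1.drop i
    else r.1
  PySem.Str.join "\n" out

-- ===== PRECONDITION & SPEC =====
def Spec_normalize_widget_css_import_py (jsx_code : String) (widget_id : String) (has_css : Bool) (out : String) : Prop := out = normalize_widget_css_import_py_alt jsx_code widget_id has_css
instance (jsx_code : String) (widget_id : String) (has_css : Bool) (out : String) : Decidable (Spec_normalize_widget_css_import_py jsx_code widget_id has_css out) := by unfold Spec_normalize_widget_css_import_py; infer_instance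

-- ===== CLAIM (what is proved, stated in full; the proofs are below) =====
def Claim_equal_normalize_widget_css_import_py : Prop := ∀ (jsx_code : String) (widget_id : String) (has_css : Bool), Dom_normalize_widget_css_import_py jsx_code widget_id has_css → Spec_normalize_widget_css_import_py jsx_code widget_id has_css (normalize_widget_css_import_py jsx_code widget_id has_css)

-- ===== LEMMAS AND PROOFS =====

-- shifting the start index shifts every collected index
theorem pvCollectA_shift (ls : List String) : ∀ i, pvCollectA (i + 1) ls = (pvCollectA i ls).map (· + 1) := by
  induction ls with
  | nil => intro i; simp [pvCollectA]
  | cons l ls ih =>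
      intro i
      by_cases h : pvCssLine l = true <;> simp [pvCollectA, h, ih (i + 1), ih i]

-- erasing at shifted indices keeps the head
theorem pvEraseFold_succ (js : List Nat) : ∀ (l : String) (ls : List String),
    (js.map (· + 1)).foldl (fun a i => a.eraseIdx i) (l :: ls)
      = l :: js.foldl (fun a i => a.eraseIdx i) ls := by
  induction js with
  | nil => intro l ls; simp
  | cons j js ih => intro l ls; simp [List.foldl_cons, List.eraseIdx_cons_succ, ih]

-- popping all collected indices in reverse is filtering out the css lines
theorem pvEraseAll (ls : List String) :
    (pvCollectA 0 ls).reverse.foldl (fun a i => a.eraseIdx i) ls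
      = ls.filter (fun l => !pvCssLine l) := by
  induction ls with
  | nil => simp [pvCollectA]
  | cons l ls ih =>
      by_cases h : pvCssLine l = true
      · simp only [pvCollectA, h, if_pos, pvCollectA_shift ls 0, List.reverse_cons,
          List.map_reverse.symm, List.foldl_append, pvEraseFold_succ]
        simp [h, ih]
      · simp only [pvCollectA, if_neg h, pvCollectA_shift ls 0,
          List.map_reverse.symm, pvEraseFold_succ]
        simp [h, ih]

-- once placed (or when has_css is false) B's pass is exactly the filter
theorem pvBuildB_filter (stmt : String) (hc p : Bool) (h : (hc && !p) = false) (ls : List String) :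
    pvBuildB hc stmt p ls = (ls.filter (fun l => !pvCssLine l), p) := by
  induction ls with
  | nil => simp [pvBuildB]
  | cons l ls ih =>
      by_cases hcss : pvCssLine l = true <;> simp [pvBuildB, hcss, h, ih]

-- when no css line was collected, B's pass is the identity and placed stays false
theorem pvBuildB_id (stmt : String) (ls : List String) : ∀ i, pvCollectA i ls = [] →
    pvBuildB true stmt false ls = (ls, false) := by
  induction ls with
  | nil => intro i _; simp [pvBuildB]
  | cons l ls ih =>
      intro i h
      by_cases hcss : pvCssLine l = true
      · simp [pvCollectA, hcss] at h
      · simp only [pvCollectA, if_neg hcss] at h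
        simp [pvBuildB, hcss, ih (i + 1) h]

-- main case: replace-first-then-pop-rest equals B's pass (and placed ends true)
theorem pvMain (stmt : String) (ls : List String) : ∀ i rest, pvCollectA 0 ls = i :: rest →
    (rest.reverse.foldl (fun a j => a.eraseIdx j) (ls.set i stmt), true)
      = pvBuildB true stmt false ls := by
  induction ls with
  | nil => intro i rest h; simp [pvCollectA] at h
  | cons l ls ih =>
      intro i rest h
      by_cases hcss : pvCssLine l = true
      · simp only [pvCollectA, if_pos hcss, pvCollectA_shift ls 0, List.cons.injEq] at h
        obtain ⟨hi, hrest⟩ := h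
        subst hi hrest
        simp only [List.set_cons_zero, List.map_reverse.symm, pvEraseFold_succ, pvEraseAll]
        simp [pvBuildB, hcss, pvBuildB_filter stmt true true rfl]
      · simp only [pvCollectA, if_neg hcss, pvCollectA_shift ls 0] at h
        cases hC : pvCollectA 0 ls with
        | nil => rw [hC] at h; simp at h
        | cons i' rest' =>
            rw [hC] at h
            simp only [List.map_cons, List.cons.injEq] at h
            obtain ⟨hi, hrest⟩ := h
            subst hi hrest
            simp only [List.set_cons_succ, List.map_reverse.symm, pvEraseFold_succ]
            have := ih i' rest' hC
            simp [pvBuildB, hcss, ← this]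

theorem pvPos_eq (ls : List String) : pvInsertPosB ls = pvCountImportsA ls := by
  induction ls with
  | nil => rfl
  | cons l ls ih => by_cases h : PySem.Str.startswith (PySem.Str.strip l) "import" = true <;>
      simp [pvInsertPosB, pvCountImportsA, ih, Nat.add_comm]

theorem pvCount_le (ls : List String) : pvCountImportsA ls ≤ ls.length := by
  induction ls with
  | nil => simp [pvCountImportsA]
  | cons l ls ih =>
      simp only [pvCountImportsA, List.length_cons]
      split <;> omega

-- ===== VERDICT (by name: the statement is the Claim_ definition above) =====
theorem normalize_widget_css_import_py_spec : Claim_equal_normalize_widget_css_import_py := by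
  intro jsx_code widget_id has_css _
  unfold Spec_normalize_widget_css_import_py normalize_widget_css_import_py normalize_widget_css_import_py_alt
  dsimp only
  cases has_css with
  | false =>
      rw [pvEraseAll, pvBuildB_filter (pvStmt widget_id) false false rfl]
      simp
  | true =>
      cases hC : pvCollectA 0 (PySem.Str.splitlines jsx_code) with
      | nil =>
          rw [pvBuildB_id (pvStmt widget_id) (PySem.Str.splitlines jsx_code) 0 hC,
            PySem.List.insert_natCast _ (pvCountImportsA (PySem.Str.splitlines jsx_code)) _
              (pvCount_le (PySem.Str.splitlines jsx_code)), ← pvPos_eq]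
          simp
      | cons first rest =>
          have h := pvMain (pvStmt widget_id) (PySem.Str.splitlines jsx_code) first rest hC
          rw [← h]
          simp
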